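-- pv_equiv track=rewrite | github.com/voidedWarranties/weebsearch | src/py/utils.py | multiline
-- ===== SOURCE A (Python) =====
-- def multiline(arr, line_len = 30):
--     lines = []
--     line = arr[0]
--     sep = ", "
--     for i, word in enumerate(arr[1:]):
--         if len(line + sep + word) > line_len:
--             lines.append(line + sep)
--             line = word
--         else:
--             line += sep + word
--
--     lines.append(line)
--
--     return "\n".join(lines)
-- ===== SOURCE B (Python) =====
-- def multiline(arr, line_len = 30):
--     # Line-splitting decomposition: per output line, scan ahead to find the
--     # longest run of remaining words that fits (pure length arithmetic),
--     # format that whole line with one join, then continue after it.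
--     lines = []
--     n = len(arr)
--     i = 0
--     while i < n:
--         width = len(arr[i])
--         j = i + 1
--         while j < n and width + 2 + len(arr[j]) <= line_len:
--             width += 2 + len(arr[j])
--             j += 1
--         line = ", ".join(arr[i:j])
--         if j < n:
--             line += ", "
--         lines.append(line)
--         i = j
--     return "\n".join(lines)
-- ===== Notes on version B (the rewrite author's own statement) =====
-- stated objective: faster
-- what changed: B replaces A's single accumulating fold (grow each line string word by word with +=) with a line-splitting decomposition: for each output line it first scans ahead with length arithmetic to find the longest run of remaining words that fits, then formats that whole line with one join; avoiding repeated string concatenation is the speed mechanism.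
-- outside the precondition, e.g. on multiline([], 30): A raises IndexError, B returns ''
import Mathlib
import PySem

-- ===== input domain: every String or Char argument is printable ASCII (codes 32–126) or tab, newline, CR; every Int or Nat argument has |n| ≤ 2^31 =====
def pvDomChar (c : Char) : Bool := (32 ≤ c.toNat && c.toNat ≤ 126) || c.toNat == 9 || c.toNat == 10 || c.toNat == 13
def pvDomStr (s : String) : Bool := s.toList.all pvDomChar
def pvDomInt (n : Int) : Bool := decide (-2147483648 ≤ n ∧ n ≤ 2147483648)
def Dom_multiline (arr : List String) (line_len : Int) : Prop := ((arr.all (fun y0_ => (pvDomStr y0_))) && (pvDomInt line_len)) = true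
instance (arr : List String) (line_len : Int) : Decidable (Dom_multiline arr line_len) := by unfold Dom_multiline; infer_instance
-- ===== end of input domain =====

-- B splits off, per output line, the longest fitting run of the remaining
-- words and formats it with one join; objective: a line-splitting decomposition that avoids repeated string concatenation (measured faster).

-- ===== PORT A =====
-- one loop step of A: grow the current line or close it with its trailing ", "
def stepA (line_len : Int) (st : List String × String) (word : String) : List String × String :=
  if PySem.Str.len (st.2 ++ ", " ++ word) > line_len then
    (st.1 ++ [st.2 ++ ", "], word)
  else
    (st.1, st.2 ++ ", " ++ word)

def multiline (arr : List String) (line_len : Int) : String :=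
  match arr with
  | [] => ""  -- arr[0] raises IndexError in Python; excluded by Pre_multiline
  | a0 :: rest =>
    -- enumerate's index i is unused, so the loop is a fold over arr[1:]
    let st := rest.foldl (stepA line_len) ([], a0)
    PySem.Str.join "\n" (st.1 ++ [st.2])

-- ===== PORT B =====
-- inner while-loop of B: scan ahead from current width, returning the words taken
-- onto this line (arr[i+1:j]) and the remaining words (arr[j:]) — the index pair
-- (i, j) over arr is represented as the taken prefix and the rest of the word list
def fitB (line_len : Int) (width : Int) : List String → List String × List String
  | [] => ([], [])
  | w :: ws =>
    if width + 2 + PySem.Str.len w ≤ line_len then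
      let p := fitB line_len (width + 2 + PySem.Str.len w) ws
      (w :: p.1, p.2)
    else
      ([], w :: ws)

-- termination helper for linesB: the rest returned by fitB is no longer than its input
theorem fitB_snd_len (line_len width : Int) : ∀ ws : List String,
    (fitB line_len width ws).2.length ≤ ws.length := by
  intro ws
  induction ws generalizing width with
  | nil => simp [fitB]
  | cons w ws ih =>
    simp only [fitB]
    split_ifs
    · exact Nat.le_succ_of_le (ih _)
    · simp

-- outer while-loop of B: one formatted line per iteration, continuing after it
def linesB (line_len : Int) : List String → List String
  | [] => []
  | a :: ws =>
    let p := fitB line_len (PySem.Str.len a) ws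
    let line := PySem.Str.join ", " (a :: p.1)
    if h : p.2 = [] then [line]
    else (line ++ ", ") :: linesB line_len p.2
termination_by l => l.length
decreasing_by
  have := fitB_snd_len line_len (PySem.Str.len a) ws
  simp only [List.length_cons]
  omega

def multiline_alt (arr : List String) (line_len : Int) : String :=
  PySem.Str.join "\n" (linesB line_len arr)

-- ===== PRECONDITION & SPEC =====
-- Pre_ excludes only the empty list, on which Python A (and B) raises IndexError.
def Pre_multiline (arr : List String) (line_len : Int) : Prop := arr ≠ []
instance (arr : List String) (line_len : Int) : Decidable (Pre_multiline arr line_len) := by unfold Pre_multiline; infer_instance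
def pvWitness_multiline : List String × Int := (["foo", "bar", "baz"], 7)

def Spec_multiline (arr : List String) (line_len : Int) (out : String) : Prop := out = multiline_alt arr line_len
instance (arr : List String) (line_len : Int) (out : String) : Decidable (Spec_multiline arr line_len out) := by unfold Spec_multiline; infer_instance

-- ===== CLAIM (what is proved, stated in full; the proofs are below) =====
def Claim_equal_multiline : Prop := ∀ (arr : List String) (line_len : Int), Dom_multiline arr line_len → Pre_multiline arr line_len → Spec_multiline arr line_len (multiline arr line_len)

-- ===== LEMMAS AND PROOFS =====

theorem str_ext (a b : String) (h : a.toList = b.toList) : a = b := by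
  have := congrArg String.ofList h
  simpa using this

theorem strLen_append (a b : String) : PySem.Str.len (a ++ b) = PySem.Str.len a + PySem.Str.len b := by
  simp [PySem.Str.len]

theorem strJoin_singleton (sep p : String) : PySem.Str.join sep [p] = p := by
  apply str_ext
  simp [PySem.Str.toList_join, PySem.Chars.join_singleton]

theorem strJoin_cons_ne (sep p : String) (ls : List String) (h : ls ≠ []) :
    PySem.Str.join sep (p :: ls) = p ++ sep ++ PySem.Str.join sep ls := by
  rcases ls with _ | ⟨q, rest⟩
  · exact absurd rfl h
  · apply str_ext
    simp [PySem.Str.toList_join, PySem.Chars.join_cons_cons]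

theorem strJoin_snoc (g : List String) (w : String) (hg : g ≠ []) :
    PySem.Str.join ", " (g ++ [w]) = PySem.Str.join ", " g ++ ", " ++ w := by
  induction g with
  | nil => exact absurd rfl hg
  | cons x xs ih =>
    rcases xs with _ | ⟨y, ys⟩
    · simp only [List.nil_append, List.cons_append]
      rw [strJoin_cons_ne _ _ _ (by simp), strJoin_singleton, strJoin_singleton]
    · rw [List.cons_append, strJoin_cons_ne _ _ _ (by simp),
          strJoin_cons_ne _ _ (y :: ys) (by simp), ih (by simp)]
      apply str_ext
      simp

theorem strJoinLen_snoc (g : List String) (w : String) (hg : g ≠ []) :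
    PySem.Str.len (PySem.Str.join ", " (g ++ [w]))
      = PySem.Str.len (PySem.Str.join ", " g) + 2 + PySem.Str.len w := by
  rw [strJoin_snoc g w hg, strLen_append, strLen_append]
  have h2 : PySem.Str.len ", " = 2 := by decide
  rw [h2]

-- the lines B produces when the current (nonempty) group is g and words ws remain
def lineOut (line_len : Int) (g : List String) (ws : List String) : List String :=
  let p := fitB line_len (PySem.Str.len (PySem.Str.join ", " g)) ws
  let line := PySem.Str.join ", " (g ++ p.1)
  if p.2 = [] then [line] else (line ++ ", ") :: linesB line_len p.2

theorem linesB_eq_lineOut (line_len : Int) (a : String) (ws : List String) :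
    linesB line_len (a :: ws) = lineOut line_len [a] ws := by
  rw [linesB, lineOut]
  simp [strJoin_singleton]

theorem key (L : Int) : ∀ (ws : List String) (acc : List String) (g : List String), g ≠ [] →
    PySem.Str.join "\n"
      ((ws.foldl (stepA L) (acc, PySem.Str.join ", " g)).1
        ++ [(ws.foldl (stepA L) (acc, PySem.Str.join ", " g)).2])
    = PySem.Str.join "\n" (acc ++ lineOut L g ws) := by
  intro ws
  induction ws with
  | nil =>
    intro acc g hg
    simp [lineOut, fitB]
  | cons w ws ih =>
    intro acc g hg
    have hc : PySem.Str.len (PySem.Str.join ", " g ++ ", " ++ w)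
        = PySem.Str.len (PySem.Str.join ", " g) + 2 + PySem.Str.len w := by
      rw [strLen_append, strLen_append]
      have h2 : PySem.Str.len ", " = 2 := by decide
      rw [h2]
    simp only [List.foldl_cons]
    by_cases hcond : PySem.Str.len (PySem.Str.join ", " g) + 2 + PySem.Str.len w > L
    · -- word does not fit: A closes the line; B's fitB stops here
      have hA : stepA L (acc, PySem.Str.join ", " g) w
          = (acc ++ [PySem.Str.join ", " g ++ ", "], PySem.Str.join ", " [w]) := by
        unfold stepA
        rw [if_pos (by rw [hc]; exact hcond), strJoin_singleton]
      rw [hA, ih (acc ++ [PySem.Str.join ", " g ++ ", "]) [w] (by simp)]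
      have hfit : fitB L (PySem.Str.len (PySem.Str.join ", " g)) (w :: ws) = ([], w :: ws) := by
        unfold fitB
        rw [if_neg (by omega)]
      rw [show lineOut L g (w :: ws)
            = (PySem.Str.join ", " g ++ ", ") :: linesB L (w :: ws) from by
          rw [lineOut, hfit]; simp,
        linesB_eq_lineOut]
      simp
    · -- word fits: A extends the line; B's fitB takes it
      have hA : stepA L (acc, PySem.Str.join ", " g) w
          = (acc, PySem.Str.join ", " (g ++ [w])) := by
        unfold stepA
        rw [if_neg (by rw [hc]; omega), strJoin_snoc g w hg]
      rw [hA, ih acc (g ++ [w]) (by simp)]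
      have hout : lineOut L g (w :: ws) = lineOut L (g ++ [w]) ws := by
        rw [lineOut, lineOut]
        have hfit : fitB L (PySem.Str.len (PySem.Str.join ", " g)) (w :: ws)
            = (w :: (fitB L (PySem.Str.len (PySem.Str.join ", " (g ++ [w]))) ws).1,
               (fitB L (PySem.Str.len (PySem.Str.join ", " (g ++ [w]))) ws).2) := by
          rw [strJoinLen_snoc g w hg]
          conv_lhs => rw [fitB]
          rw [if_pos (by omega)]
        rw [hfit]
        simp
      rw [hout]

-- ===== VERDICT (by name: the statement is the Claim_ definition above) =====
theorem multiline_spec : Claim_equal_multiline := by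
  intro arr line_len _hdom hpre
  unfold Spec_multiline
  rcases arr with _ | ⟨a0, rest⟩
  · exact absurd rfl hpre
  · show multiline (a0 :: rest) line_len = multiline_alt (a0 :: rest) line_len
    have h := key line_len rest [] [a0] (by simp)
    rw [strJoin_singleton] at h
    rw [multiline, multiline_alt, linesB_eq_lineOut]
    simpa using h
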